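-- pv_equiv track=rewrite | github.com/ran187/Osu-Mania-7K-to-6K-Chart-Converter | parse_osu_file_tools.py | parse_osu_blocks
-- ===== SOURCE A (Python) =====
-- def parse_osu_blocks(lines):
--     """
--     将读取到的文件行保存在数据结构中
--     lines: 列表, 文件内容按行保存, 可以由read_osu_file_lines函数得到
--     """
--     osu_blocks = {}
--     blocks_order = []
--     current_block = None
--     current_lines = []
--
--     for line in lines:
--         if line.startswith('[') and line.endswith(']'):
--             if current_block is not None:
--                 osu_blocks[current_block] = current_lines.copy()
--             current_block = line
--             blocks_order.append(current_block)
--             current_lines = []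
--         else:
--             if current_block is not None and line.strip() != "":
--                 current_lines.append(line)
--
--     if current_block is not None:
--         osu_blocks[current_block] = current_lines
--
--     return osu_blocks, blocks_order
-- ===== SOURCE B (Python) =====
-- def _is_header(line):
--     return line.startswith('[') and line.endswith(']')
--
--
-- def _next_header(lines, i):
--     """Smallest index j >= i with lines[j] a header line, or len(lines)."""
--     while i < len(lines) and not _is_header(lines[i]):
--         i += 1
--     return i
--
--
-- def parse_osu_blocks(lines):
--     osu_blocks = {}
--     blocks_order = []
--     i = _next_header(lines, 0)
--     while i < len(lines):
--         name = lines[i]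
--         j = _next_header(lines, i + 1)
--         blocks_order.append(name)
--         osu_blocks[name] = [l for l in lines[i + 1:j] if l.strip() != ""]
--         i = j
--     return osu_blocks, blocks_order
-- ===== Notes on version B (the rewrite author's own statement) =====
-- stated objective: alternative
-- what changed: Replaced A's single-pass state machine with current_block/current_lines accumulators by a two-phase chunking decomposition: scan for each header index, then assign that header the strip-filtered slice of lines up to the next header.
import Mathlib
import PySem

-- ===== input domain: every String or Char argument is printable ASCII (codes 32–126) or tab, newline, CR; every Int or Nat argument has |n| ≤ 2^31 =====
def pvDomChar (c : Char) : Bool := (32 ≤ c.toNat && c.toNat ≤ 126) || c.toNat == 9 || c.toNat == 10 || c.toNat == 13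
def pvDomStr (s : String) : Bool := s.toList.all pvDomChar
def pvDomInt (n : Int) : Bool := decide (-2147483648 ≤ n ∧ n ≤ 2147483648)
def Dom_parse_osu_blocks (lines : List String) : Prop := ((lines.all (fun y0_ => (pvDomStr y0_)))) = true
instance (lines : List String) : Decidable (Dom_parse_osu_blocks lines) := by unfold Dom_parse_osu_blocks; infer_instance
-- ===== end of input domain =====

-- B replaces A's single-pass state machine (current_block/current_lines accumulators) by a
-- two-phase chunking decomposition: find each header index, then assign that header the filtered
-- slice up to the next header. Objective: alternative decomposition (same asymptotic cost).

-- ===== PORT A =====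
def pvIsHeaderA (line : String) : Bool :=
  PySem.Str.startswith line "[" && PySem.Str.endswith line "]"

-- A's for-loop over `lines` with state (osu_blocks, blocks_order, current_block, current_lines);
-- the base case performs A's trailing `if current_block is not None` insertion.
def pvLoopA : List String → PySem.Dict String (List String) → List String →
    Option String → List String → PySem.Dict String (List String) × List String
  | [], d, ord, cb, cur =>
      (match cb with
       | none => d
       | some b => d.insert b cur, ord)
  | l :: ls, d, ord, cb, cur =>
      if pvIsHeaderA l then
        pvLoopA ls (match cb with
                    | none => d
                    | some b => d.insert b cur) (ord ++ [l]) (some l) []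
      else
        pvLoopA ls d ord cb
          (if cb.isSome && PySem.Str.strip l != "" then cur ++ [l] else cur)

def parse_osu_blocks (lines : List String) : (List (String × List String)) × List String :=
  let r := pvLoopA lines PySem.Dict.empty [] none []
  (r.1.items, r.2)

-- ===== PORT B =====
def pvIsHeaderB (line : String) : Bool :=
  PySem.Str.startswith line "[" && PySem.Str.endswith line "]"

-- Source B's _next_header: smallest index j ≥ i with lines[j] a header line, or len(lines)
def pvNextHeader (lines : List String) (i : Nat) : Nat :=
  if h : i < lines.length then
    if pvIsHeaderB lines[i] then i else pvNextHeader lines (i + 1)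
  else i
  termination_by lines.length - i

theorem pvNextHeader_ge (lines : List String) (i : Nat) : i ≤ pvNextHeader lines i := by
  fun_induction pvNextHeader lines i with
  | case1 => omega
  | case2 _ _ _ ih => omega
  | case3 => omega

-- Source B's main while loop: one header and its filtered slice per iteration
def pvChunkIdx (lines : List String) (i : Nat) (d : PySem.Dict String (List String))
    (ord : List String) : PySem.Dict String (List String) × List String :=
  if h : i < lines.length then
    let name := lines[i]
    let j := pvNextHeader lines (i + 1)
    pvChunkIdx lines j
      (d.insert name ((PySem.List.slice lines (some ((i : Int) + 1)) (some (j : Int))).filter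
        (fun l => PySem.Str.strip l != "")))
      (ord ++ [name])
  else (d, ord)
  termination_by lines.length - i
  decreasing_by
    have := pvNextHeader_ge lines (i + 1)
    omega

def parse_osu_blocks_alt (lines : List String) : (List (String × List String)) × List String :=
  let r := pvChunkIdx lines (pvNextHeader lines 0) PySem.Dict.empty []
  (r.1.items, r.2)

-- ===== PRECONDITION & SPEC =====
def Spec_parse_osu_blocks (lines : List String) (out : (List (String × List String)) × List String) : Prop := out = parse_osu_blocks_alt lines
instance (lines : List String) (out : (List (String × List String)) × List String) : Decidable (Spec_parse_osu_blocks lines out) := by unfold Spec_parse_osu_blocks; infer_instance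

-- ===== CLAIM (what is proved, stated in full; the proofs are below) =====
def Claim_equal_parse_osu_blocks : Prop := ∀ (lines : List String), Dom_parse_osu_blocks lines → Spec_parse_osu_blocks lines (parse_osu_blocks lines)

-- ===== LEMMAS AND PROOFS =====

theorem pvIsHeaderA_eq (l : String) : pvIsHeaderA l = pvIsHeaderB l := rfl

-- Proof-side list-based chunking: the common shape both ports are reduced to.
def pvSpanBody : List String → List String × List String
  | [] => ([], [])
  | l :: ls =>
      if pvIsHeaderB l then ([], l :: ls)
      else
        let r := pvSpanBody ls
        (l :: r.1, r.2)

def pvDropToHeader : List String → List String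
  | [] => []
  | l :: ls => if pvIsHeaderB l then l :: ls else pvDropToHeader ls

theorem pvSpanBody_len_le : ∀ (ls : List String), (pvSpanBody ls).2.length ≤ ls.length := by
  intro ls
  induction ls with
  | nil => simp [pvSpanBody]
  | cons l ls ih =>
      by_cases h : pvIsHeaderB l = true
      · simp [pvSpanBody, h]
      · simp [pvSpanBody, h]; omega

def pvChunkL : List String → PySem.Dict String (List String) → List String →
    PySem.Dict String (List String) × List String
  | [], d, ord => (d, ord)
  | name :: ls, d, ord =>
      let s := pvSpanBody ls
      pvChunkL s.2 (d.insert name (s.1.filter (fun l => PySem.Str.strip l != "")))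
        (ord ++ [name])
  termination_by ls _ _ => ls.length
  decreasing_by
    have := pvSpanBody_len_le ls
    simp only [List.length_cons]
    omega

theorem pvChunkL_nil (d : PySem.Dict String (List String)) (ord : List String) :
    pvChunkL [] d ord = (d, ord) := by
  rw [pvChunkL]

theorem pvChunkL_cons (name : String) (ls : List String)
    (d : PySem.Dict String (List String)) (ord : List String) :
    pvChunkL (name :: ls) d ord
      = pvChunkL (pvSpanBody ls).2
          (d.insert name ((pvSpanBody ls).1.filter (fun l => PySem.Str.strip l != "")))
          (ord ++ [name]) := by
  rw [pvChunkL]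

-- ===== A-side: the state machine reduces to pvChunkL =====

-- Inside an open block (current_block = some b), A's remaining loop equals a pvChunkL call on
-- the remainder past the current block's body, with the body's non-blank lines appended to cur.
theorem pvLoopA_some (ls : List String) : ∀ (d : PySem.Dict String (List String))
    (ord : List String) (b : String) (cur : List String),
    pvLoopA ls d ord (some b) cur
      = pvChunkL (pvSpanBody ls).2
          (d.insert b (cur ++ (pvSpanBody ls).1.filter (fun l => PySem.Str.strip l != "")))
          ord := by
  induction ls with
  | nil => intro d ord b cur; simp [pvLoopA, pvSpanBody, pvChunkL_nil]
  | cons l ls ih =>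
      intro d ord b cur
      by_cases h : pvIsHeaderB l = true
      · simp only [pvLoopA, pvSpanBody, pvIsHeaderA_eq, h, if_pos]
        rw [pvChunkL_cons, ih]
        simp
      · simp only [pvLoopA, pvSpanBody, pvIsHeaderA_eq, h, if_neg, Bool.false_eq_true,
          not_false_eq_true, Option.isSome_some, Bool.true_and]
        rw [ih]
        simp only [List.filter_cons]
        by_cases hs : (PySem.Str.strip l != "") = true
        · rw [if_pos hs, if_pos hs]; simp
        · rw [if_neg hs, if_neg hs]

-- Before the first header, A's loop with current_block = None just skips lines.
theorem pvLoopA_none (ls : List String) : ∀ (d : PySem.Dict String (List String))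
    (ord : List String),
    pvLoopA ls d ord none [] = pvChunkL (pvDropToHeader ls) d ord := by
  induction ls with
  | nil => intro d ord; simp [pvLoopA, pvDropToHeader, pvChunkL_nil]
  | cons l ls ih =>
      intro d ord
      by_cases h : pvIsHeaderB l = true
      · simp only [pvLoopA, pvDropToHeader, pvIsHeaderA_eq, h, if_pos]
        rw [pvChunkL_cons, pvLoopA_some]
        simp
      · simp only [pvLoopA, pvDropToHeader, pvIsHeaderA_eq, h, if_neg, Bool.false_eq_true,
          not_false_eq_true, Option.isSome_none, Bool.false_and]
        exact ih d ord

-- ===== B-side: the index machine reduces to pvChunkL =====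

theorem pvNextHeader_span (lines : List String) (i : Nat) :
    PySem.List.slice lines (some (i : Int)) (some ((pvNextHeader lines i) : Int))
        = (pvSpanBody (lines.drop i)).1
      ∧ lines.drop (pvNextHeader lines i) = (pvSpanBody (lines.drop i)).2 := by
  fun_induction pvNextHeader lines i with
  | case1 i h hdr =>
      rw [List.drop_eq_getElem_cons h]
      constructor
      · rw [PySem.List.slice_natCast]
        simp [pvSpanBody, hdr]
      · simp [pvSpanBody, hdr]
  | case2 i h hdr ih =>
      have hge := pvNextHeader_ge lines (i + 1)
      rw [List.drop_eq_getElem_cons h]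
      constructor
      · have h1 : ((i : Int)) = (((i : Nat) : Int)) := rfl
        rw [PySem.List.slice_natCast, List.drop_eq_getElem_cons h]
        have : pvNextHeader lines (i + 1) - i = (pvNextHeader lines (i + 1) - (i + 1)) + 1 := by
          omega
        rw [this, List.take_succ_cons]
        have := ih.1
        rw [PySem.List.slice_natCast] at this
        rw [this]
        simp [pvSpanBody, hdr]
      · rw [ih.2]
        simp [pvSpanBody, hdr]
  | case3 i h =>
      have hd : lines.drop i = [] := List.drop_eq_nil_of_le (by omega)
      rw [hd]
      constructor
      · rw [PySem.List.slice_natCast, hd]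
        simp [pvSpanBody]
      · simp [pvSpanBody]

theorem pvNextHeader_drop (lines : List String) (i : Nat) :
    lines.drop (pvNextHeader lines i) = pvDropToHeader (lines.drop i) := by
  fun_induction pvNextHeader lines i with
  | case1 i h hdr =>
      rw [List.drop_eq_getElem_cons h, pvDropToHeader, if_pos hdr, ← List.drop_eq_getElem_cons h]
  | case2 i h hdr ih =>
      rw [List.drop_eq_getElem_cons h, pvDropToHeader, if_neg (by simp [hdr]), ih]
  | case3 i h =>
      rw [List.drop_eq_nil_of_le (by omega)]
      simp [pvDropToHeader]

theorem pvChunkIdx_eq (lines : List String) (i : Nat) (d : PySem.Dict String (List String))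
    (ord : List String) :
    pvChunkIdx lines i d ord = pvChunkL (lines.drop i) d ord := by
  fun_induction pvChunkIdx lines i d ord with
  | case1 i d ord h name j ih =>
      rw [List.drop_eq_getElem_cons h, pvChunkL_cons, ih]
      have hspan := pvNextHeader_span lines (i + 1)
      have hcast : ((i : Int) + 1) = (((i + 1 : Nat) : Int)) := by push_cast; ring
      show pvChunkL (lines.drop (pvNextHeader lines (i + 1))) _ _ = _
      rw [hcast, hspan.1, hspan.2]
  | case2 i d ord h =>
      rw [List.drop_eq_nil_of_le (by omega), pvChunkL_nil]

-- ===== VERDICT (by name: the statement is the Claim_ definition above) =====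
theorem parse_osu_blocks_spec : Claim_equal_parse_osu_blocks := by
  intro lines _
  unfold Spec_parse_osu_blocks parse_osu_blocks parse_osu_blocks_alt
  rw [pvLoopA_none, pvChunkIdx_eq, pvNextHeader_drop]
  rfl
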